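-- pv_equiv track=rewrite | github.com/lmy6268/ky_algorithm | 251029/모의고사/solution.py | solution
-- ===== SOURCE A (Python) =====
-- def solution(answers):
--     answer = []
--
--     n1 = [1,2,3,4,5]
--     n2 = [2,1,2,3,2,4,2,5]
--     n3 = [3,3,1,1,2,2,4,4,5,5]
--
--     scores = [0,0,0]
--
--     #원형 리스트로 생각하고, 탐색
--     for i,v in enumerate(answers):
--         if n1[i%5] == v:
--             scores[0] +=1
--         if n2[i%8] == v:
--             scores[1] +=1
--         if n3[i%10] == v:
--             scores[2] +=1
--
--     ms = max(scores)
--     for i,v in enumerate(scores):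
--         if v == ms:
--             answer.append(i+1)
--
--
--
--     return answer
-- ===== SOURCE B (Python) =====
-- def cycle_score(pat, answers):
--     # one pass per pattern, driven by an explicitly cycled copy of the pattern
--     rest = []
--     c = 0
--     for a in answers:
--         if not rest:
--             rest = list(pat)
--         p = rest.pop(0)
--         if p == a:
--             c += 1
--     return c
--
--
-- def solution(answers):
--     patterns = [[1, 2, 3, 4, 5],
--                 [2, 1, 2, 3, 2, 4, 2, 5],
--                 [3, 3, 1, 1, 2, 2, 4, 4, 5, 5]]
--     scores = [cycle_score(p, answers) for p in patterns]
--     ms = max(scores)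
--     return [i + 1 for i, v in enumerate(scores) if v == ms]
-- ===== Notes on version B (the rewrite author's own statement) =====
-- stated objective: alternative
-- what changed: B scores each answer sheet in a separate pass that walks an explicitly cycled copy of each pattern (pop-from-front with refill) instead of A's single interleaved loop indexing all three patterns by i % k, and collects the winners with a comprehension over enumerate(scores).
import Mathlib
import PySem

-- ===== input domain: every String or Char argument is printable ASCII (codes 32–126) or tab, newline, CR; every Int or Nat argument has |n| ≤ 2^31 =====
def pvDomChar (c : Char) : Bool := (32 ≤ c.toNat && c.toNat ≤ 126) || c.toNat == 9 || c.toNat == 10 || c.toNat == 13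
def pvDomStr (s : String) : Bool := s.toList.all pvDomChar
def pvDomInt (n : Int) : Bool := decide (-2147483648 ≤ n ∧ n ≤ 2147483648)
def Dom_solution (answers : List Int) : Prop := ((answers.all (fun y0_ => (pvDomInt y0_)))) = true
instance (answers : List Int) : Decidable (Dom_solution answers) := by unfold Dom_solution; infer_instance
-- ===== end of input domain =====

-- B scores each pattern in its own cycled-copy pass (pop-from-front with refill) instead of A's
-- single interleaved i % k loop; same cost, different decomposition (objective: alternative).


-- ===== PORT A =====
-- the three fixed answer patterns of A
def pvN1 : List Int := [1,2,3,4,5]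
def pvN2 : List Int := [2,1,2,3,2,4,2,5]
def pvN3 : List Int := [3,3,1,1,2,2,4,4,5,5]

-- one step of A's combined loop body (the three `if`s, in order)
def pvStepA (s : Int × Int × Int) (iv : Int × Int) : Int × Int × Int :=
  let s := if PySem.List.pyGet? pvN1 (PySem.Int.mod iv.1 5) = some iv.2 then (s.1 + 1, s.2.1, s.2.2) else s
  let s := if PySem.List.pyGet? pvN2 (PySem.Int.mod iv.1 8) = some iv.2 then (s.1, s.2.1 + 1, s.2.2) else s
  if PySem.List.pyGet? pvN3 (PySem.Int.mod iv.1 10) = some iv.2 then (s.1, s.2.1, s.2.2 + 1) else s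

def solution (answers : List Int) : List Int :=
  let scores := (PySem.List.enumerate answers 0).foldl pvStepA (0, 0, 0)
  let slist : List Int := [scores.1, scores.2.1, scores.2.2]
  match PySem.List.max? slist (fun x => x) with
  | none => []   -- unreachable: slist has three elements
  | some ms =>
    (PySem.List.enumerate slist 0).foldl
      (fun ans iv => if iv.2 == ms then ans ++ [iv.1 + 1] else ans) []

-- ===== PORT B =====
-- B: score one pattern in one pass, walking a cycled copy of the pattern
def cycleScore (pat : List Int) (answers : List Int) : Int :=
  (answers.foldl (fun (st : List Int × Int) a =>
      let rest := if st.1.isEmpty then pat else st.1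
      match rest with
      | [] => (rest, st.2)          -- unreachable for the non-empty patterns used
      | p :: t => (t, if p = a then st.2 + 1 else st.2)) ([], 0)).2

def solution_alt (answers : List Int) : List Int :=
  let scores := [pvN1, pvN2, pvN3].map (fun pat => cycleScore pat answers)
  match PySem.List.max? scores (fun x => x) with
  | none => []   -- unreachable: three patterns
  | some ms =>
    ((PySem.List.enumerate scores 0).filter (fun iv => iv.2 == ms)).map (fun iv => iv.1 + 1)

-- ===== PRECONDITION & SPEC =====
def Spec_solution (answers : List Int) (out : List Int) : Prop := out = solution_alt answers
instance (answers : List Int) (out : List Int) : Decidable (Spec_solution answers out) := by unfold Spec_solution; infer_instance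

-- ===== CLAIM (what is proved, stated in full; the proofs are below) =====
def Claim_equal_solution : Prop := ∀ (answers : List Int), Dom_solution answers → Spec_solution answers (solution answers)

-- ===== LEMMAS AND PROOFS =====

-- reference count: matches of answers against pat cycled, starting at absolute position k
def pvCnt (pat : List Int) : Nat → List Int → Int
  | _, [] => 0
  | k, v :: vs => (if pat.getD (k % pat.length) 0 = v then 1 else 0) + pvCnt pat (k + 1) vs

lemma pyGet?_mod_eq (pat : List Int) (hp : 0 < pat.length) (k : Nat) (v : Int) :
    (PySem.List.pyGet? pat (PySem.Int.mod (k : Int) (pat.length : Int)) = some v)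
      ↔ pat.getD (k % pat.length) 0 = v := by
  have h : k % pat.length < pat.length := Nat.mod_lt _ hp
  have h0 : (0:Int) ≤ (k:Int) % (pat.length:Int) := Int.emod_nonneg _ (by exact_mod_cast hp.ne')
  have hlt : (k:Int) % (pat.length:Int) < (pat.length:Int) := Int.emod_lt_of_pos _ (by exact_mod_cast hp)
  have ht : ((k:Int) % (pat.length:Int)).toNat = k % pat.length := by omega
  simp [PySem.List.pyGet?, PySem.List.pyIdx?, h0, hlt, ht, h, List.getD, eq_comm]

lemma cond1 (k : Nat) (v : Int) :
    (PySem.List.pyGet? pvN1 (PySem.Int.mod (k : Int) 5) = some v) ↔ pvN1.getD (k % 5) 0 = v := by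
  simpa [pvN1] using pyGet?_mod_eq pvN1 (by decide) k v

lemma cond2 (k : Nat) (v : Int) :
    (PySem.List.pyGet? pvN2 (PySem.Int.mod (k : Int) 8) = some v) ↔ pvN2.getD (k % 8) 0 = v := by
  simpa [pvN2] using pyGet?_mod_eq pvN2 (by decide) k v

lemma cond3 (k : Nat) (v : Int) :
    (PySem.List.pyGet? pvN3 (PySem.Int.mod (k : Int) 10) = some v) ↔ pvN3.getD (k % 10) 0 = v := by
  simpa [pvN3] using pyGet?_mod_eq pvN3 (by decide) k v

lemma A_fold (vs : List Int) : ∀ (k : Nat) (a b c : Int),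
    (PySem.List.enumerate vs (k : Int)).foldl pvStepA (a, b, c)
      = (a + pvCnt pvN1 k vs, b + pvCnt pvN2 k vs, c + pvCnt pvN3 k vs) := by
  induction vs with
  | nil => intro k a b c; simp [PySem.List.enumerate, pvCnt]
  | cons v vs ih =>
    intro k a b c
    rw [PySem.List.enumerate_cons]
    have hk : (k : Int) + 1 = ((k + 1 : Nat) : Int) := by push_cast; ring
    simp only [List.foldl_cons, pvStepA, hk]
    simp only [cond1, cond2, cond3, pvCnt]
    have h1 : pvN1.length = 5 := rfl
    have h2 : pvN2.length = 8 := rfl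
    have h3 : pvN3.length = 10 := rfl
    rw [h1, h2, h3]
    rw [ih (k + 1)]
    split_ifs <;> simp [Prod.ext_iff, add_assoc]

lemma cyc_inv (pat : List Int) (hp : 0 < pat.length) (vs : List Int) :
    ∀ (k : Nat) (rest : List Int) (c : Int),
    (if rest.isEmpty then pat else rest) = pat.drop (k % pat.length) →
    (vs.foldl (fun (st : List Int × Int) a =>
      let rest := if st.1.isEmpty then pat else st.1
      match rest with
      | [] => (rest, st.2)
      | p :: t => (t, if p = a then st.2 + 1 else st.2)) (rest, c)).2 = c + pvCnt pat k vs := by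
  induction vs with
  | nil => intro k rest c _; simp [pvCnt]
  | cons v vs ih =>
    intro k rest c hrest
    have hk : k % pat.length < pat.length := Nat.mod_lt _ hp
    have hd : pat.drop (k % pat.length) = pat[k % pat.length] :: pat.drop (k % pat.length + 1) :=
      List.drop_eq_getElem_cons hk
    have hmod : (k % pat.length + 1) % pat.length = (k + 1) % pat.length := by
      rw [Nat.mod_add_mod]
    have hnew : (if (pat.drop (k % pat.length + 1)).isEmpty then pat
          else pat.drop (k % pat.length + 1)) = pat.drop ((k + 1) % pat.length) := by
      by_cases hend : k % pat.length + 1 = pat.length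
      · have hnil : pat.drop (k % pat.length + 1) = [] := by
          rw [hend]; exact List.drop_length
        have hz : (k + 1) % pat.length = 0 := by rw [← hmod, hend, Nat.mod_self]
        simp [hnil, hz]
      · have hlt : k % pat.length + 1 < pat.length := by omega
        have hne : pat.drop (k % pat.length + 1) ≠ [] := by
          simp [List.drop_eq_nil_iff]; omega
        rw [← hmod, Nat.mod_eq_of_lt hlt]
        simp [hne]
    simp only [List.foldl_cons, hrest, hd]
    rw [ih (k + 1) _ _ hnew]
    simp only [pvCnt, List.getD_eq_getElem _ _ hk]
    split_ifs <;> ring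

lemma cycleScore_eq (pat : List Int) (hp : 0 < pat.length) (vs : List Int) :
    cycleScore pat vs = pvCnt pat 0 vs := by
  unfold cycleScore
  rw [cyc_inv pat hp vs 0 [] 0 (by simp)]
  simp

-- ===== VERDICT (by name: the statement is the Claim_ definition above) =====
theorem solution_spec : Claim_equal_solution := by
  intro answers _
  unfold Spec_solution solution solution_alt
  have h1 := cycleScore_eq pvN1 (by decide) answers
  have h2 := cycleScore_eq pvN2 (by decide) answers
  have h3 := cycleScore_eq pvN3 (by decide) answers
  have hA := A_fold answers 0 0 0 0
  simp only [Int.natCast_zero] at hA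
  simp only [List.map, h1, h2, h3, hA, zero_add]
  cases hmax : PySem.List.max? [pvCnt pvN1 0 answers, pvCnt pvN2 0 answers, pvCnt pvN3 0 answers] (fun x => x) with
  | none => rfl
  | some ms =>
      dsimp only
      rw [PySem.List.foldl_append_if (fun iv : Int × Int => iv.2 == ms) (fun iv => iv.1 + 1)]
      simp
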